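-- pv_equiv track=rewrite | github.com/aw578/bril | cs6120/lesson_3/lvn.py | find_overwrites
-- ===== SOURCE A (Python) =====
-- def find_overwrites(instrs):
--   overwritten = [False for _ in instrs]
--   used = set()
--   for i in range(len(instrs) - 1, -1, -1):
--     instr = instrs[i]
--     if "dest" in instr:
--       if instr["dest"] in used:
--         overwritten[i] = True
--       else:
--         used.add(instr["dest"])
--   return overwritten
-- ===== SOURCE B (Python) =====
-- def find_overwrites(instrs):
--   last = {}
--   for i, instr in enumerate(instrs):
--     if "dest" in instr:
--       last[instr["dest"]] = i
--   return [("dest" in instr) and last[instr["dest"]] != i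
--           for i, instr in enumerate(instrs)]
-- ===== Notes on version B (the rewrite author's own statement) =====
-- stated objective: alternative
-- what changed: Replaces the backward scan with a membership set by two forward passes: first build a dict mapping each dest to its last writing index, then mark an instruction overwritten iff its index is not that last index.
import Mathlib
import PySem

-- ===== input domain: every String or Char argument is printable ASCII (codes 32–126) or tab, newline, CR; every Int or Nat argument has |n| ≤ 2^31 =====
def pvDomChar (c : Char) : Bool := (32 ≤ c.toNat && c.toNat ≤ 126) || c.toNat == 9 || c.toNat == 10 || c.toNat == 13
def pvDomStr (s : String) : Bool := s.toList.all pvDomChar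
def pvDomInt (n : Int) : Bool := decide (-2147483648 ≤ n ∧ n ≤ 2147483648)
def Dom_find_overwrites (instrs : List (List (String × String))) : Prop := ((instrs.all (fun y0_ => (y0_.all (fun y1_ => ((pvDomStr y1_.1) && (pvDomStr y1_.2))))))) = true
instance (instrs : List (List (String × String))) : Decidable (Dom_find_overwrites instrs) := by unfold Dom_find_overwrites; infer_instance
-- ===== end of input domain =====

-- B replaces A's backward scan with a used-set by two forward passes over a
-- last-writer index table; equivalence of the RETURN value is proved (neither
-- program mutates its argument).

-- ===== PORT A =====
-- A scans indices from len-1 down to 0, marking overwritten[i] when the dest was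
-- already seen to the right; ported as the obvious structural recursion from the
-- right carrying the same (used set, output list) state.
def find_overwrites (instrs : List (List (String × String))) : List Bool :=
  (instrs.foldr
    (fun instr (st : PySem.Set String × List Bool) =>
      match (PySem.Dict.mk instr).get? "dest" with
      | some d =>
          if PySem.Set.contains st.1 d then (st.1, true :: st.2)
          else (PySem.Set.add st.1 d, false :: st.2)
      | none => (st.1, false :: st.2))
    (PySem.Set.empty, [])).2

-- ===== PORT B =====
-- forward pass: last[dest] = index of the last instruction writing dest
def bLast (instrs : List (List (String × String))) : PySem.Dict String Int :=
  (PySem.List.enumerate instrs).foldl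
    (fun d p =>
      match (PySem.Dict.mk p.2).get? "dest" with
      | some dd => d.insert dd p.1
      | none => d)
    PySem.Dict.empty

def find_overwrites_alt (instrs : List (List (String × String))) : List Bool :=
  let last := bLast instrs
  (PySem.List.enumerate instrs).map
    (fun p =>
      match (PySem.Dict.mk p.2).get? "dest" with
      | some dd =>
          match last.get? dd with
          | some j => decide (j ≠ p.1)
          | none => false   -- unreachable: a present dest was recorded in the first pass
      | none => false)

-- ===== PRECONDITION & SPEC =====
def Spec_find_overwrites (instrs : List (List (String × String))) (out : List Bool) : Prop := out = find_overwrites_alt instrs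
instance (instrs : List (List (String × String))) (out : List Bool) : Decidable (Spec_find_overwrites instrs out) := by unfold Spec_find_overwrites; infer_instance

-- ===== CLAIM (what is proved, stated in full; the proofs are below) =====
def Claim_equal_find_overwrites : Prop := ∀ (instrs : List (List (String × String))), Dom_find_overwrites instrs → Spec_find_overwrites instrs (find_overwrites instrs)

-- ===== LEMMAS AND PROOFS =====

-- the "dest" field of one instruction (first match, as for a Python dict key)
def dst (instr : List (String × String)) : Option String :=
  (PySem.Dict.mk instr).get? "dest"

-- reference value: head marked iff some later instruction writes the same dest
def hasDest (d : String) (xs : List (List (String × String))) : Bool :=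
  xs.any (fun y => dst y == some d)

def specList : List (List (String × String)) → List Bool
  | [] => []
  | x :: xs =>
      (match dst x with
       | some d => hasDest d xs
       | none => false) :: specList xs

-- index (from s) of the LAST instruction in xs whose dest is key
def lastAt (xs : List (List (String × String))) (s : Int) (key : String) : Option Int :=
  match xs with
  | [] => none
  | x :: xs' =>
      match lastAt xs' (s + 1) key with
      | some j => some j
      | none => if dst x == some key then some s else none

-- ---- A-side ----

def stepA (instr : List (String × String)) (st : PySem.Set String × List Bool) :
    PySem.Set String × List Bool :=
  match (PySem.Dict.mk instr).get? "dest" with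
  | some d =>
      if PySem.Set.contains st.1 d then (st.1, true :: st.2)
      else (PySem.Set.add st.1 d, false :: st.2)
  | none => (st.1, false :: st.2)

lemma find_overwrites_eq_foldr (instrs : List (List (String × String))) :
    find_overwrites instrs = (instrs.foldr stepA (PySem.Set.empty, [])).2 := rfl

lemma hasDest_cons_iff (d : String) (x : List (String × String))
    (xs : List (List (String × String))) :
    hasDest d (x :: xs) = true ↔ dst x = some d ∨ hasDest d xs = true := by
  simp [hasDest, List.any_cons, dst]

lemma foldrA_fst_mem (xs : List (List (String × String))) (d : String) :
    (d ∈ (xs.foldr stepA (PySem.Set.empty, [])).1) ↔ hasDest d xs = true := by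
  induction xs with
  | nil => simp [hasDest, PySem.Set.empty]
  | cons x xs ih =>
      rw [List.foldr_cons, hasDest_cons_iff]
      set r := xs.foldr stepA (PySem.Set.empty, []) with hr
      unfold stepA
      cases h : (PySem.Dict.mk x).get? "dest" with
      | none =>
          show d ∈ r.1 ↔ _
          rw [ih]
          simp [dst, h]
      | some dd =>
          show d ∈ (if r.1.contains dd = true then (r.1, true :: r.2)
                    else (r.1.add dd, false :: r.2) : PySem.Set String × List Bool).1 ↔ _
          by_cases hc : PySem.Set.contains r.1 dd = true
          · rw [if_pos hc]
            have hmem : dd ∈ r.1 :=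
              (PySem.Set.contains_iff _ _).1 hc
            constructor
            · intro hm; right; exact ih.1 hm
            · rintro (h1 | h2)
              · simp only [dst, h, Option.some.injEq] at h1
                rw [← h1]; exact hmem
              · exact ih.2 h2
          · rw [if_neg hc]
            show d ∈ PySem.Set.add _ dd ↔ _
            rw [PySem.Set.mem_add, ih]
            simp only [dst, h, Option.some.injEq]
            constructor
            · rintro (h1 | h2)
              · right; exact h1
              · left; exact h2.symm
            · rintro (h1 | h2)
              · right; exact h1.symm
              · left; exact h2

lemma foldrA_snd (xs : List (List (String × String))) :
    (xs.foldr stepA (PySem.Set.empty, [])).2 = specList xs := by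
  induction xs with
  | nil => rfl
  | cons x xs ih =>
      rw [List.foldr_cons, specList]
      set r := xs.foldr stepA (PySem.Set.empty, []) with hr
      unfold stepA
      cases h : (PySem.Dict.mk x).get? "dest" with
      | none => simp only [h, dst]; rw [ih]
      | some dd =>
          simp only [h, dst]
          by_cases hc : PySem.Set.contains r.1 dd = true
          · have hd : hasDest dd xs = true := by
              rw [← foldrA_fst_mem, ← hr]
              exact (PySem.Set.contains_iff _ _).1 hc
            rw [if_pos hc, ih, hd]
          · have hd : hasDest dd xs = false := by
              rw [← Bool.not_eq_true, ← foldrA_fst_mem, ← hr, ← PySem.Set.contains_iff]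
              exact hc
            rw [if_neg hc, ih, hd]

lemma A_eq_spec (xs : List (List (String × String))) :
    find_overwrites xs = specList xs := by
  rw [find_overwrites_eq_foldr, foldrA_snd]

-- ---- B-side ----

def stepB (d : PySem.Dict String Int) (p : Int × List (String × String)) :
    PySem.Dict String Int :=
  match (PySem.Dict.mk p.2).get? "dest" with
  | some dd => d.insert dd p.1
  | none => d

lemma bLast_eq (instrs : List (List (String × String))) :
    bLast instrs = (PySem.List.enumerate instrs).foldl stepB PySem.Dict.empty := rfl

-- the first pass realises lastAt
lemma foldlB_get? (xs : List (List (String × String))) (s : Int)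
    (d0 : PySem.Dict String Int) (key : String) :
    ((PySem.List.enumerate xs s).foldl stepB d0).get? key =
      match lastAt xs s key with
      | some j => some j
      | none => d0.get? key := by
  induction xs generalizing s d0 with
  | nil => simp [PySem.List.enumerate_nil, lastAt]
  | cons x xs ih =>
      rw [PySem.List.enumerate_cons, List.foldl_cons, ih]
      have hstep : (stepB d0 (s, x)).get? key =
          match (if dst x == some key then some s else none : Option Int) with
          | some j => some j
          | none => d0.get? key := by
        simp only [stepB]
        rw [show (PySem.Dict.mk x).get? "dest" = dst x from rfl]
        cases h : dst x with
        | none => simp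
        | some dd =>
            by_cases hk : dd = key
            · subst hk; simp [PySem.Dict.get?_insert_self]
            · simp [hk, PySem.Dict.get?_insert_of_ne d0 s (fun he => hk he.symm)]
      cases hl : lastAt xs (s + 1) key with
      | some j => simp [lastAt, hl]
      | none => simp [lastAt, hl, hstep]

lemma lastAt_ge (xs : List (List (String × String))) (key : String) :
    ∀ s j : Int, lastAt xs s key = some j → s ≤ j := by
  induction xs with
  | nil => intro s j h; simp [lastAt] at h
  | cons x xs ih =>
      intro s j h
      simp only [lastAt] at h
      cases hl : lastAt xs (s + 1) key with
      | some j2 =>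
          rw [hl] at h
          have := ih (s + 1) j2 hl
          simp at h; omega
      | none =>
          rw [hl] at h
          by_cases hd : (dst x == some key) = true
          · simp [hd] at h; omega
          · simp [hd] at h

lemma hasDest_cons_bool (key : String) (x : List (String × String))
    (xs : List (List (String × String))) :
    hasDest key (x :: xs) = ((dst x == some key) || hasDest key xs) := rfl

lemma lastAt_none_iff (xs : List (List (String × String))) (s : Int) (key : String) :
    lastAt xs s key = none ↔ hasDest key xs = false := by
  induction xs generalizing s with
  | nil => simp [lastAt, hasDest]
  | cons x xs ih =>
      simp only [lastAt]
      have hx := ih (s + 1)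
      rw [hasDest_cons_bool]
      cases hl : lastAt xs (s + 1) key with
      | some j =>
          have h2 : hasDest key xs = true := by
            by_contra hh
            rw [Bool.not_eq_true, ← hx, hl] at hh
            simp at hh
          simp [h2]
      | none =>
          have hxf : hasDest key xs = false := hx.1 hl
          by_cases hd : (dst x == some key) = true
          · simp [hd]
          · simp at hd
            simp [hd, hxf]

-- splitting lastAt at an append
lemma lastAt_append (as bs : List (List (String × String))) (s : Int) (key : String) :
    lastAt (as ++ bs) s key =
      match lastAt bs (s + as.length) key with
      | some j => some j
      | none => lastAt as s key := by
  induction as generalizing s with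
  | nil =>
      simp only [List.nil_append, List.length_nil, Nat.cast_zero, add_zero]
      cases lastAt bs s key <;> simp [lastAt]
  | cons a as ih =>
      simp only [List.cons_append, lastAt, ih (s + 1), List.length_cons]
      have harith : s + (((as.length : Int)) + 1) = s + 1 + (as.length : Int) := by ring
      push_cast
      rw [harith]
      cases lastAt bs (s + 1 + (as.length : Int)) key <;> cases lastAt as (s + 1) key <;> simp

-- B's second pass, one position at a time
lemma B_map_eq_spec (instrs : List (List (String × String))) (pre suf : List (List (String × String)))
    (hsplit : instrs = pre ++ suf) :
    (PySem.List.enumerate suf (pre.length)).map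
      (fun p =>
        match (PySem.Dict.mk p.2).get? "dest" with
        | some dd =>
            match (bLast instrs).get? dd with
            | some j => decide (j ≠ p.1)
            | none => false
        | none => false) = specList suf := by
  induction suf generalizing pre with
  | nil => simp [PySem.List.enumerate_nil, specList]
  | cons x xs ih =>
      rw [PySem.List.enumerate_cons, List.map_cons, specList]
      have htail : instrs = (pre ++ [x]) ++ xs := by simp [hsplit]
      have htl := ih (pre ++ [x]) htail
      have hlen : ((pre ++ [x]).length : Int) = (pre.length : Int) + 1 := by simp
      rw [hlen] at htl
      rw [htl]
      congr 1
      cases h : (PySem.Dict.mk x).get? "dest" with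
      | none => simp [h, dst]
      | some d =>
          have hdst : dst x = some d := h
          have hget := foldlB_get? instrs 0 PySem.Dict.empty d
          rw [← bLast_eq] at hget
          have hmid : lastAt instrs 0 d =
              match lastAt xs (0 + (pre.length : Int) + 1) d with
              | some j => some j
              | none => some (0 + (pre.length : Int)) := by
            rw [hsplit, lastAt_append pre (x :: xs) 0 d]
            simp only [lastAt, hdst]
            cases lastAt xs (0 + (pre.length : Int) + 1) d <;> simp
          cases hl : lastAt xs (0 + (pre.length : Int) + 1) d with
          | some j =>
              have hm2 : lastAt instrs 0 d = some j := by rw [hmid, hl]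
              have hg2 : (bLast instrs).get? d = some j := by rw [hget, hm2]
              have hj : 0 + (pre.length : Int) + 1 ≤ j := lastAt_ge xs d _ j hl
              have hj' : j ≠ (pre.length : Int) := by omega
              have hh : hasDest d xs = true := by
                by_contra hc
                rw [Bool.not_eq_true,
                    ← lastAt_none_iff xs (0 + (pre.length : Int) + 1) d, hl] at hc
                simp at hc
              simp [hg2, hdst, hh, hj']
          | none =>
              have hm2 : lastAt instrs 0 d = some (0 + (pre.length : Int)) := by rw [hmid, hl]
              have hg2 : (bLast instrs).get? d = some (0 + (pre.length : Int)) := by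
                rw [hget, hm2]
              have hh : hasDest d xs = false := (lastAt_none_iff xs _ d).1 hl
              simp [hg2, hdst, hh]

lemma B_eq_spec (instrs : List (List (String × String))) :
    find_overwrites_alt instrs = specList instrs := by
  have := B_map_eq_spec instrs [] instrs (by simp)
  simpa [find_overwrites_alt] using this

-- ===== VERDICT (by name: the statement is the Claim_ definition above) =====
theorem find_overwrites_spec : Claim_equal_find_overwrites := by
  intro instrs _
  unfold Spec_find_overwrites
  rw [A_eq_spec, B_eq_spec]
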